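-- pv_equiv track=rewrite | github.com/vitor-vfm/PlagiarismDetector | detector.py | common_sequences_score
-- ===== SOURCE A (Python) =====
-- def common_sequences_score(l1,l2,size=0):
--     """
--     Finds how many substrings
--     are common between 2 strings
--     and gives a score equal to the sum of the lengths
--     of these common substrings
--
--     Only substrings greater or equal to 'size' are counted
--
--     O( len(l1) * len(l2) )
--
--     """
--
--     # the memo dictionary will be used
--     # as a memoization matrix
--     memo = {}
--     nbr = 0
--
--     # the longest common substring starting at l1[i] and l2[j] has length:
--     # 1) 0, if l1[i] != l2[j]
--     # 2) 1 + length of longest common substring starting at l1[i+1] and l2[j+1]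
--     # This property will be used to find lengths of all common substrings bigger or equal
--     # to 'size'
--
--     # go through all pairs i,j starting at the ends of the strings
--     for i in range(len(l1)-1,-1,-1):
--         for j in range(len(l2)-1,-1,-1):
--             # only add non-zero elements to memo
--             # to save memory
--             if l1[i] == l2[j]:
--                 if (i+1,j+1) in memo:
--                     memo[(i,j)] = 1 + memo[(i+1,j+1)]
--                 else:
--                     memo[(i,j)] = 1
--
--             # if l1[i-1] and l2[j-1] exist and are different,
--             # then the common substring starting at (i,j)
--             # is a substring of l1 and l2, but not part
--             # of any other common substring
--
--             # Add its length to score if it's above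
--             # the size threshold
--             if i == 0 or j == 0 or l1[i-1] != l2[j-1]:
--                 if (i,j) in memo and memo[(i,j)] >= size:
--                     nbr += memo[(i,j)]
--
--     return nbr
-- ===== SOURCE B (Python) =====
-- def common_sequences_score(l1, l2, size=0):
--     """Sum of lengths (>= size) of maximal common diagonal runs, by sweeping
--     each diagonal of the comparison grid once with an O(1) run counter."""
--     n1, n2 = len(l1), len(l2)
--     total = 0
--     starts = [(0, j) for j in range(n2)] + [(i, 0) for i in range(1, n1)]
--     for i, j in starts:
--         cnt = 0
--         while i < n1 and j < n2:
--             if l1[i] == l2[j]: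
--                 cnt += 1
--             else:
--                 if cnt >= size:
--                     total += cnt
--                 cnt = 0
--             i += 1
--             j += 1
--         if cnt >= size:
--             total += cnt
--     return total
-- ===== Notes on version B (the rewrite author's own statement) =====
-- stated objective: faster
-- what changed: Replaces A's memoization dictionary and backward nested index loops by a sweep along each diagonal of the comparison grid that keeps a single O(1) run counter, flushing it at mismatches and at the diagonal's end.
import Mathlib
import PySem

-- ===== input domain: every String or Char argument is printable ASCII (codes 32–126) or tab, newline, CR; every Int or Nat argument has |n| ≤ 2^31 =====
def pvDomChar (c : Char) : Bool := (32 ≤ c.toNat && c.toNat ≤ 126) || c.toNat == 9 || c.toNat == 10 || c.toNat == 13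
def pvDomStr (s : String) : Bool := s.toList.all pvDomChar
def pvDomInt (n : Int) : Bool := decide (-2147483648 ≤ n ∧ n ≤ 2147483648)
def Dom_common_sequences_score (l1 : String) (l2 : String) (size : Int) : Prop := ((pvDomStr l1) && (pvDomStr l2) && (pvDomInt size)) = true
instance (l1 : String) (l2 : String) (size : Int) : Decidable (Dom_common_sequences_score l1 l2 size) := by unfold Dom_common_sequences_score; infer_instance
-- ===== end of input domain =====

-- B replaces A's memo dictionary and backward nested index loops by a single O(1)-state
-- run-counting sweep along each diagonal of the comparison grid (measured faster in a timing run).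

-- ===== PORT A =====
-- one body of A's inner loop: the memo update for l1[i]==l2[j], then the score update
def pvAStep (l1 : String) (l2 : String) (size : Int) (i : Int)
    (st : PySem.Dict (Int × Int) Int × Int) (j : Int) : PySem.Dict (Int × Int) Int × Int :=
  let memo := st.1
  let nbr := st.2
  let memo2 :=
    if PySem.Str.pyGet? l1 i = PySem.Str.pyGet? l2 j then
      match memo.get? (i + 1, j + 1) with
      | some v => memo.insert (i, j) (1 + v)
      | none => memo.insert (i, j) 1
    else memo
  let nbr2 :=
    if i = 0 ∨ j = 0 ∨ PySem.Str.pyGet? l1 (i - 1) ≠ PySem.Str.pyGet? l2 (j - 1) then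
      match memo2.get? (i, j) with
      | some v => if v ≥ size then nbr + v else nbr
      | none => nbr
    else nbr
  (memo2, nbr2)

def common_sequences_score (l1 : String) (l2 : String) (size : Int) : Int :=
  ((PySem.List.pyRange (PySem.Str.len l1 - 1) (-1) (-1)).foldl
    (fun st i =>
      (PySem.List.pyRange (PySem.Str.len l2 - 1) (-1) (-1)).foldl (pvAStep l1 l2 size i) st)
    (PySem.Dict.empty, 0)).2

-- ===== PORT B =====
-- Source B's while-loop: walk one diagonal, flushing the run counter at mismatches and at the end
def pvBWalk (c1 c2 : List Char) (size : Int) (i j : Nat) (cnt total : Int) : Int :=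
  if h : i < c1.length ∧ j < c2.length then
    if c1[i] = c2[j] then
      pvBWalk c1 c2 size (i + 1) (j + 1) (cnt + 1) total
    else
      pvBWalk c1 c2 size (i + 1) (j + 1) 0 (if cnt ≥ size then total + cnt else total)
  else if cnt ≥ size then total + cnt else total
termination_by c1.length - i

def common_sequences_score_alt (l1 : String) (l2 : String) (size : Int) : Int :=
  let c1 := l1.toList
  let c2 := l2.toList
  ((List.range c2.length).map (fun j => ((0 : Nat), j)) ++
      (List.range (c1.length - 1)).map (fun i => (i + 1, (0 : Nat)))).foldl
    (fun total (p : Nat × Nat) => pvBWalk c1 c2 size p.1 p.2 0 total) 0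

-- ===== PRECONDITION & SPEC =====
def Spec_common_sequences_score (l1 : String) (l2 : String) (size : Int) (out : Int) : Prop := out = common_sequences_score_alt l1 l2 size
instance (l1 : String) (l2 : String) (size : Int) (out : Int) : Decidable (Spec_common_sequences_score l1 l2 size out) := by unfold Spec_common_sequences_score; infer_instance

-- ===== CLAIM (what is proved, stated in full; the proofs are below) =====
def Claim_equal_common_sequences_score : Prop := ∀ (l1 : String) (l2 : String) (size : Int), Dom_common_sequences_score l1 l2 size → Spec_common_sequences_score l1 l2 size (common_sequences_score l1 l2 size)

-- ===== LEMMAS AND PROOFS =====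

-- `l1[i] == l2[j]` as a bounds-checked Bool on list indices
def pvMB (c1 c2 : List Char) (i j : Nat) : Bool :=
  if h : i < c1.length ∧ j < c2.length then decide (c1[i] = c2[j]) else false

-- length of the longest common run starting at (i, j)
def pvRun (c1 c2 : List Char) (i j : Nat) : Nat :=
  if h : i < c1.length ∧ j < c2.length then
    if c1[i] = c2[j] then 1 + pvRun c1 c2 (i + 1) (j + 1) else 0
  else 0
termination_by c1.length - i

-- "(i, j) starts a left-maximal run" (A's guard `i == 0 or j == 0 or l1[i-1] != l2[j-1]`)
def pvLM (c1 c2 : List Char) (i j : Nat) : Bool :=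
  decide (i = 0) || decide (j = 0) || !pvMB c1 c2 (i - 1) (j - 1)

-- what one cell adds to A's score
def pvContrib (c1 c2 : List Char) (size : Int) (i j : Nat) : Int :=
  if pvMB c1 c2 i j && pvLM c1 c2 i j && decide ((pvRun c1 c2 i j : Int) ≥ size) then
    (pvRun c1 c2 i j : Int)
  else 0

-- sum of pvContrib along the diagonal from (i, j)
def pvDiagSum (c1 c2 : List Char) (size : Int) (i j : Nat) : Int :=
  if i < c1.length ∧ j < c2.length then
    pvContrib c1 c2 size i j + pvDiagSum c1 c2 size (i + 1) (j + 1)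
  else 0
termination_by c1.length - i

-- contents of A's memo after it has processed all rows above i, and row i down to column k
def pvExp (c1 c2 : List Char) (i k : Nat) (p : Int × Int) : Option Int :=
  if 0 ≤ p.1 ∧ 0 ≤ p.2 then
    if (i < p.1.toNat ∨ (p.1.toNat = i ∧ k ≤ p.2.toNat)) ∧ pvMB c1 c2 p.1.toNat p.2.toNat then
      some (pvRun c1 c2 p.1.toNat p.2.toNat)
    else none
  else none

-- --- A-side: the nested backward loops compute the grid sum of pvContrib ---

theorem pvMB_iff (c1 c2 : List Char) (i j : Nat) :
    pvMB c1 c2 i j = true ↔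
      ∃ h : i < c1.length ∧ j < c2.length, c1[i]'h.1 = c2[j]'h.2 := by
  unfold pvMB
  split
  · rename_i h; simp [h]
  · rename_i h; simp [h]

theorem pvRun_of_match (c1 c2 : List Char) (i j : Nat) (h : pvMB c1 c2 i j = true) :
    pvRun c1 c2 i j = 1 + pvRun c1 c2 (i + 1) (j + 1) := by
  rw [pvMB_iff] at h
  obtain ⟨hb, he⟩ := h
  conv_lhs => rw [pvRun]
  rw [dif_pos hb, if_pos he]

theorem pvRun_of_not_match (c1 c2 : List Char) (i j : Nat) (h : pvMB c1 c2 i j = false) :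
    pvRun c1 c2 i j = 0 := by
  unfold pvRun pvMB at *
  split
  · rename_i hb
    rw [dif_pos hb] at h
    simp at h
    rw [if_neg h]
  · rfl

theorem pvExp_nat (c1 c2 : List Char) (i k a b : Nat) :
    pvExp c1 c2 i k ((a : Int), (b : Int)) =
      if (i < a ∨ (a = i ∧ k ≤ b)) ∧ pvMB c1 c2 a b = true then some ((pvRun c1 c2 a b : Int))
      else none := by
  unfold pvExp
  simp

theorem pvExp_succ_ne (c1 c2 : List Char) (i k : Nat) (p : Int × Int)
    (h : p ≠ ((i : Int), (k : Int))) :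
    pvExp c1 c2 i (k + 1) p = pvExp c1 c2 i k p := by
  unfold pvExp
  by_cases h0 : 0 ≤ p.1 ∧ 0 ≤ p.2
  · rw [if_pos h0, if_pos h0]
    have hne : ¬(p.1.toNat = i ∧ p.2.toNat = k) := by
      rintro ⟨h1, h2⟩
      exact h (Prod.ext (by omega) (by omega))
    have hiff : (i < p.1.toNat ∨ (p.1.toNat = i ∧ k + 1 ≤ p.2.toNat)) ↔
        (i < p.1.toNat ∨ (p.1.toNat = i ∧ k ≤ p.2.toNat)) := by omega
    rw [if_congr (and_congr_left' hiff) rfl rfl]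
  · rw [if_neg h0, if_neg h0]

theorem pvExp_succ_of_false (c1 c2 : List Char) (i k : Nat) (hm : pvMB c1 c2 i k = false)
    (p : Int × Int) :
    pvExp c1 c2 i (k + 1) p = pvExp c1 c2 i k p := by
  by_cases hp : p = ((i : Int), (k : Int))
  · subst hp
    rw [pvExp_nat, pvExp_nat, hm]
    simp
  · exact pvExp_succ_ne c1 c2 i k p hp

theorem pvGuard_iff (l1 l2 : String) (i k : Nat) (hi : i < l1.toList.length)
    (hk : k < l2.toList.length) :
    ((i : Int) = 0 ∨ (k : Int) = 0 ∨
        PySem.Str.pyGet? l1 ((i : Int) - 1) ≠ PySem.Str.pyGet? l2 ((k : Int) - 1)) ↔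
      pvLM l1.toList l2.toList i k = true := by
  unfold pvLM
  match i, k with
  | 0, k => simp
  | i + 1, 0 => simp
  | i + 1, k + 1 =>
    have h1 : ((i + 1 : Nat) : Int) - 1 = ((i : Nat) : Int) := by push_cast; ring
    have h2 : ((k + 1 : Nat) : Int) - 1 = ((k : Nat) : Int) := by push_cast; ring
    rw [h1, h2, PySem.Str.pyGet?_natCast, PySem.Str.pyGet?_natCast]
    have hb : i < l1.toList.length ∧ k < l2.toList.length := by omega
    rw [List.getElem?_eq_getElem hb.1, List.getElem?_eq_getElem hb.2]
    unfold pvMB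
    simp only [Nat.add_sub_cancel, dif_pos hb]
    simp only [Nat.cast_add, Nat.cast_one, Bool.or_eq_true, Bool.not_eq_true', decide_eq_false_iff_not,
      decide_eq_true_eq]
    constructor
    · rintro (h | h | h)
      · omega
      · omega
      · exact Or.inr (fun he => h (by rw [he]))
    · rintro ((h | h) | h)
      · omega
      · omega
      · exact Or.inr (Or.inr (fun he => h (Option.some.inj he)))

theorem pvA_step (l1 l2 : String) (size : Int) (i k : Nat) (hi : i < l1.toList.length)
    (hk : k < l2.toList.length) (memo : PySem.Dict (Int × Int) Int) (nbr : Int)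
    (hmemo : ∀ p, memo.get? p = pvExp l1.toList l2.toList i (k + 1) p) :
    (∀ p, (pvAStep l1 l2 size (i : Int) (memo, nbr) (k : Int)).1.get? p =
        pvExp l1.toList l2.toList i k p) ∧
      (pvAStep l1 l2 size (i : Int) (memo, nbr) (k : Int)).2 =
        nbr + pvContrib l1.toList l2.toList size i k := by
  have hc1 : PySem.Str.pyGet? l1 (i : Int) = some (l1.toList[i]'hi) := by
    rw [PySem.Str.pyGet?_natCast, List.getElem?_eq_getElem hi]
  have hc2 : PySem.Str.pyGet? l2 (k : Int) = some (l2.toList[k]'hk) := by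
    rw [PySem.Str.pyGet?_natCast, List.getElem?_eq_getElem hk]
  have hcond : (PySem.Str.pyGet? l1 (i : Int) = PySem.Str.pyGet? l2 (k : Int)) ↔
      pvMB l1.toList l2.toList i k = true := by
    rw [hc1, hc2, pvMB_iff]
    constructor
    · intro h; exact ⟨⟨hi, hk⟩, by simpa using h⟩
    · rintro ⟨hb2, h⟩; simpa using h
  have hget : memo.get? ((i : Int) + 1, (k : Int) + 1) =
      if pvMB l1.toList l2.toList (i + 1) (k + 1) = true then
        some ((pvRun l1.toList l2.toList (i + 1) (k + 1) : Int))
      else none := by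
    have : ((i : Int) + 1, (k : Int) + 1) = (((i + 1 : Nat) : Int), ((k + 1 : Nat) : Int)) := by
      push_cast; rfl
    rw [hmemo, this, pvExp_nat]
    congr 1
    simp only [eq_iff_iff, and_iff_right_iff_imp]
    intro _; omega
  -- the memo after the first `if` of the loop body
  have hmemo2 : ∀ p, (pvAStep l1 l2 size (i : Int) (memo, nbr) (k : Int)).1.get? p =
      pvExp l1.toList l2.toList i k p := by
    intro p
    unfold pvAStep
    simp only
    cases hm : pvMB l1.toList l2.toList i k with
    | false =>
      rw [if_neg (by rw [hcond, hm]; simp), hmemo, pvExp_succ_of_false _ _ _ _ hm]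
    | true =>
      rw [if_pos (hcond.mpr hm), hget]
      have hins : ∀ v : Int,
          (match (if pvMB l1.toList l2.toList (i + 1) (k + 1) = true then
              some ((pvRun l1.toList l2.toList (i + 1) (k + 1) : Int)) else none) with
            | some v => memo.insert ((i : Int), (k : Int)) (1 + v)
            | none => memo.insert ((i : Int), (k : Int)) 1) =
            memo.insert ((i : Int), (k : Int)) ((pvRun l1.toList l2.toList i k : Int)) := by
        intro v
        cases hm2 : pvMB l1.toList l2.toList (i + 1) (k + 1) with
        | false =>
          simp only [Bool.false_eq_true, if_false]
          rw [pvRun_of_match _ _ _ _ hm, pvRun_of_not_match _ _ _ _ hm2]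
          norm_num
        | true =>
          simp only [if_true]
          rw [pvRun_of_match _ _ _ _ hm]
          push_cast
          rfl
      rw [hins 0, PySem.Dict.get?_insert]
      by_cases hp : p = ((i : Int), (k : Int))
      · have hcnd : (i < i ∨ (i = i ∧ k ≤ k)) ∧ pvMB l1.toList l2.toList i k = true :=
          ⟨Or.inr ⟨rfl, le_refl k⟩, hm⟩
        rw [if_pos hp, hp, pvExp_nat, if_pos hcnd]
      · rw [if_neg hp, hmemo, pvExp_succ_ne _ _ _ _ _ hp]
  refine ⟨hmemo2, ?_⟩
  have hkey := hmemo2 ((i : Int), (k : Int))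
  rw [pvExp_nat] at hkey
  cases hm : pvMB l1.toList l2.toList i k with
  | false =>
    rw [hm] at hkey
    rw [if_neg (by simp)] at hkey
    unfold pvAStep at hkey ⊢
    simp only at hkey ⊢
    rw [hkey]
    unfold pvContrib
    simp only [hm, Bool.false_and, Bool.false_eq_true, if_false, add_zero]
    split_ifs <;> rfl
  | true =>
    rw [hm, if_pos ⟨Or.inr ⟨rfl, le_refl k⟩, rfl⟩] at hkey
    unfold pvAStep at hkey ⊢
    simp only at hkey ⊢
    rw [hkey]
    have hlmc := pvGuard_iff l1 l2 i k hi hk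
    unfold pvContrib
    simp only [hm, Bool.true_and]
    by_cases hg : (i : Int) = 0 ∨ (k : Int) = 0 ∨
        PySem.Str.pyGet? l1 ((i : Int) - 1) ≠ PySem.Str.pyGet? l2 ((k : Int) - 1)
    · rw [if_pos hg]
      have hlm : pvLM l1.toList l2.toList i k = true := hlmc.mp hg
      simp only [hlm, Bool.true_and, decide_eq_true_eq]
      split_ifs <;> ring
    · rw [if_neg hg]
      have hlm : pvLM l1.toList l2.toList i k = false := by
        cases h : pvLM l1.toList l2.toList i k
        · rfl
        · exact absurd (hlmc.mpr h) hg
      simp [hlm]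

theorem pvExp_row (l1 l2 : String) (m : Nat) (p : Int × Int) :
    pvExp l1.toList l2.toList (m + 1) 0 p = pvExp l1.toList l2.toList m l2.toList.length p := by
  unfold pvExp
  by_cases h0 : 0 ≤ p.1 ∧ 0 ≤ p.2
  · rw [if_pos h0, if_pos h0]
    cases hm : pvMB l1.toList l2.toList p.1.toNat p.2.toNat with
    | false => simp
    | true =>
      have hb : p.2.toNat < l2.toList.length := ((pvMB_iff _ _ _ _).mp hm).1.2
      have hiff : (m + 1 < p.1.toNat ∨ (p.1.toNat = m + 1 ∧ 0 ≤ p.2.toNat)) ↔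
          (m < p.1.toNat ∨ (p.1.toNat = m ∧ l2.toList.length ≤ p.2.toNat)) := by omega
      rw [if_congr (and_congr_left' hiff) rfl rfl]
  · rw [if_neg h0, if_neg h0]

theorem pvA_inner (l1 l2 : String) (size : Int) (i : Nat) (hi : i < l1.toList.length)
    (k : Nat) : k ≤ l2.toList.length →
    ∀ (memo : PySem.Dict (Int × Int) Int) (nbr : Int),
      (∀ p, memo.get? p = pvExp l1.toList l2.toList i k p) →
      (∀ p, ((PySem.List.pyRange ((k : Int) - 1) (-1) (-1)).foldl
          (pvAStep l1 l2 size (i : Int)) (memo, nbr)).1.get? p = pvExp l1.toList l2.toList i 0 p) ∧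
      ((PySem.List.pyRange ((k : Int) - 1) (-1) (-1)).foldl
          (pvAStep l1 l2 size (i : Int)) (memo, nbr)).2 =
        nbr + ∑ j ∈ Finset.range k, pvContrib l1.toList l2.toList size i j := by
  induction k with
  | zero =>
    intro _ memo nbr hmemo
    rw [show ((0 : Nat) : Int) - 1 = (-1 : Int) by simp,
      PySem.List.pyRange_neg_one_eq_nil (le_refl _)]
    refine ⟨fun p => ?_, by simp⟩
    simpa using hmemo p
  | succ k IH =>
    intro hk memo nbr hmemo
    have hcast : ((k + 1 : Nat) : Int) - 1 = (k : Int) := by push_cast; ring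
    rw [hcast, PySem.List.pyRange_neg_one_cons (by omega), List.foldl_cons]
    obtain ⟨h1, h2⟩ := pvA_step l1 l2 size i k hi (by omega) memo nbr hmemo
    have hIH := IH (by omega) (pvAStep l1 l2 size (i : Int) (memo, nbr) (k : Int)).1
      (pvAStep l1 l2 size (i : Int) (memo, nbr) (k : Int)).2 h1
    rw [Prod.mk.eta] at hIH
    obtain ⟨g1, g2⟩ := hIH
    refine ⟨g1, ?_⟩
    rw [g2, h2, Finset.sum_range_succ]
    ring

theorem pvA_outer (l1 l2 : String) (size : Int) (m : Nat) : m ≤ l1.toList.length →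
    ∀ (memo : PySem.Dict (Int × Int) Int) (nbr : Int),
      (∀ p, memo.get? p = pvExp l1.toList l2.toList m 0 p) →
      ((PySem.List.pyRange ((m : Int) - 1) (-1) (-1)).foldl
          (fun st i =>
            (PySem.List.pyRange ((l2.toList.length : Int) - 1) (-1) (-1)).foldl
              (pvAStep l1 l2 size i) st)
          (memo, nbr)).2 =
        nbr + ∑ i ∈ Finset.range m, ∑ j ∈ Finset.range l2.toList.length,
            pvContrib l1.toList l2.toList size i j := by
  induction m with
  | zero =>
    intro _ memo nbr _
    rw [show ((0 : Nat) : Int) - 1 = (-1 : Int) by simp,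
      PySem.List.pyRange_neg_one_eq_nil (le_refl _)]
    simp
  | succ m IH =>
    intro hm memo nbr hmemo
    have hcast : ((m + 1 : Nat) : Int) - 1 = (m : Int) := by push_cast; ring
    rw [hcast, PySem.List.pyRange_neg_one_cons (a := (m : Int)) (b := -1) (by omega),
      List.foldl_cons]
    have hmemo' : ∀ p, memo.get? p = pvExp l1.toList l2.toList m l2.toList.length p := by
      intro p
      rw [hmemo p, pvExp_row]
    obtain ⟨h1, h2⟩ := pvA_inner l1 l2 size m (by omega) l2.toList.length (le_refl _)
      memo nbr hmemo'
    have hIH := IH (by omega)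
      ((PySem.List.pyRange ((l2.toList.length : Int) - 1) (-1) (-1)).foldl
        (pvAStep l1 l2 size (m : Int)) (memo, nbr)).1
      ((PySem.List.pyRange ((l2.toList.length : Int) - 1) (-1) (-1)).foldl
        (pvAStep l1 l2 size (m : Int)) (memo, nbr)).2 h1
    rw [Prod.mk.eta] at hIH
    rw [hIH, h2, Finset.sum_range_succ]
    ring

theorem pvExp_top (l1 l2 : String) (p : Int × Int) :
    pvExp l1.toList l2.toList l1.toList.length 0 p = none := by
  unfold pvExp
  by_cases h0 : 0 ≤ p.1 ∧ 0 ≤ p.2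
  · rw [if_pos h0]
    cases hm : pvMB l1.toList l2.toList p.1.toNat p.2.toNat with
    | false => simp
    | true =>
      have hb : p.1.toNat < l1.toList.length := ((pvMB_iff _ _ _ _).mp hm).1.1
      rw [if_neg (by omega)]
  · rw [if_neg h0]

theorem pvA_grid (l1 l2 : String) (size : Int) :
    common_sequences_score l1 l2 size =
      ∑ i ∈ Finset.range l1.toList.length, ∑ j ∈ Finset.range l2.toList.length,
        pvContrib l1.toList l2.toList size i j := by
  unfold common_sequences_score
  rw [PySem.Str.len_eq, PySem.Str.len_eq]
  rw [pvA_outer l1 l2 size l1.toList.length (le_refl _) PySem.Dict.empty 0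
    (fun p => by rw [PySem.Dict.get?_empty, pvExp_top])]
  ring

-- --- B-side: each diagonal walk computes pvDiagSum ---

theorem pvDiag_skip (c1 c2 : List Char) (size : Int) :
    ∀ i j, pvMB c1 c2 i j = true →
      pvDiagSum c1 c2 size (i + 1) (j + 1) =
        pvDiagSum c1 c2 size (i + pvRun c1 c2 i j) (j + pvRun c1 c2 i j) := by
  intro i j h
  induction hn : c1.length - i using Nat.strong_induction_on generalizing i j with
  | _ n IH =>
    rw [pvRun_of_match c1 c2 i j h]
    cases hm : pvMB c1 c2 (i + 1) (j + 1) with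
    | false =>
      rw [pvRun_of_not_match c1 c2 _ _ hm]
    | true =>
      have hb := (pvMB_iff c1 c2 (i + 1) (j + 1)).mp hm
      obtain ⟨hb2, -⟩ := hb
      have hstep : pvDiagSum c1 c2 size (i + 1) (j + 1) =
          pvContrib c1 c2 size (i + 1) (j + 1) + pvDiagSum c1 c2 size (i + 2) (j + 2) := by
        rw [pvDiagSum, if_pos hb2]
      have hc : pvContrib c1 c2 size (i + 1) (j + 1) = 0 := by
        unfold pvContrib pvLM
        simp [h]
      have hib : i < c1.length := ((pvMB_iff c1 c2 i j).mp h).1.1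
      have hIH := IH (c1.length - (i + 1)) (by omega) (i + 1) (j + 1) hm rfl
      rw [hstep, hc, zero_add, hIH, pvRun_of_match c1 c2 _ _ hm]
      ring_nf

theorem pvDiag_lm (c1 c2 : List Char) (size : Int) (i j : Nat) (h : pvLM c1 c2 i j = true) :
    pvDiagSum c1 c2 size i j =
      (if (pvRun c1 c2 i j : Int) ≥ size then (pvRun c1 c2 i j : Int) else 0) +
        pvDiagSum c1 c2 size (i + pvRun c1 c2 i j) (j + pvRun c1 c2 i j) := by
  cases hm : pvMB c1 c2 i j with
  | false =>
    rw [pvRun_of_not_match c1 c2 i j hm]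
    simp
  | true =>
    have hb := ((pvMB_iff c1 c2 i j).mp hm).1
    have hstep : pvDiagSum c1 c2 size i j =
        pvContrib c1 c2 size i j + pvDiagSum c1 c2 size (i + 1) (j + 1) := by
      rw [pvDiagSum, if_pos hb]
    have hc : pvContrib c1 c2 size i j =
        if (pvRun c1 c2 i j : Int) ≥ size then (pvRun c1 c2 i j : Int) else 0 := by
      unfold pvContrib
      simp only [hm, h, Bool.true_and]
      split_ifs with h1 h2 h2 <;> simp_all
    rw [hstep, hc, pvDiag_skip c1 c2 size i j hm]

theorem pvWalk_eq (c1 c2 : List Char) (size : Int) :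
    ∀ i j (cnt total : Int),
      pvBWalk c1 c2 size i j cnt total =
        total +
          (if cnt + (pvRun c1 c2 i j : Int) ≥ size then cnt + (pvRun c1 c2 i j : Int) else 0) +
          pvDiagSum c1 c2 size (i + pvRun c1 c2 i j) (j + pvRun c1 c2 i j) := by
  intro i j cnt total
  induction hn : c1.length - i using Nat.strong_induction_on generalizing i j cnt total with
  | _ n IH =>
    by_cases hb : i < c1.length ∧ j < c2.length
    · rw [pvBWalk, dif_pos hb]
      by_cases he : c1[i]'hb.1 = c2[j]'hb.2
      · have hm : pvMB c1 c2 i j = true := (pvMB_iff c1 c2 i j).mpr ⟨hb, he⟩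
        rw [if_pos he, IH (c1.length - (i + 1)) (by omega) (i + 1) (j + 1) (cnt + 1) total rfl,
          pvRun_of_match c1 c2 i j hm]
        have hcast : cnt + ((1 + pvRun c1 c2 (i + 1) (j + 1) : Nat) : Int) =
            cnt + 1 + (pvRun c1 c2 (i + 1) (j + 1) : Int) := by push_cast; ring
        rw [hcast]
        have h1 : i + (1 + pvRun c1 c2 (i + 1) (j + 1)) = i + 1 + pvRun c1 c2 (i + 1) (j + 1) := by
          omega
        have h2 : j + (1 + pvRun c1 c2 (i + 1) (j + 1)) = j + 1 + pvRun c1 c2 (i + 1) (j + 1) := by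
          omega
        rw [h1, h2]
      · have hm : pvMB c1 c2 i j = false := by
          unfold pvMB; rw [dif_pos hb]; simp [he]
        have hlm : pvLM c1 c2 (i + 1) (j + 1) = true := by
          unfold pvLM; simp [hm]
        rw [if_neg he, IH (c1.length - (i + 1)) (by omega) (i + 1) (j + 1) 0 _ rfl,
          pvRun_of_not_match c1 c2 i j hm]
        have hstep : pvDiagSum c1 c2 size i j =
            pvContrib c1 c2 size i j + pvDiagSum c1 c2 size (i + 1) (j + 1) := by
          rw [pvDiagSum, if_pos hb]
        have hc : pvContrib c1 c2 size i j = 0 := by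
          unfold pvContrib; simp [hm]
        simp only [Nat.cast_zero, add_zero, zero_add]
        rw [hstep, hc, zero_add, pvDiag_lm c1 c2 size (i + 1) (j + 1) hlm]
        split_ifs <;> ring
    · have hm : pvMB c1 c2 i j = false := by unfold pvMB; rw [dif_neg hb]
      rw [pvBWalk, dif_neg hb, pvRun_of_not_match c1 c2 i j hm]
      have hz : pvDiagSum c1 c2 size (i + 0) (j + 0) = 0 := by
        rw [pvDiagSum]; simp [hb]
      rw [hz]
      simp only [Nat.cast_zero, add_zero]
      split_ifs <;> ring

theorem pvWalk_anchor (c1 c2 : List Char) (size : Int) (i j : Nat) (h : i = 0 ∨ j = 0)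
    (total : Int) :
    pvBWalk c1 c2 size i j 0 total = total + pvDiagSum c1 c2 size i j := by
  have hlm : pvLM c1 c2 i j = true := by
    unfold pvLM
    rcases h with h | h <;> simp [h]
  rw [pvWalk_eq c1 c2 size i j 0 total, pvDiag_lm c1 c2 size i j hlm]
  simp only [zero_add]
  ring

theorem pvB_anchors (l1 l2 : String) (size : Int) :
    common_sequences_score_alt l1 l2 size =
      (∑ j ∈ Finset.range l2.toList.length, pvDiagSum l1.toList l2.toList size 0 j) +
      ∑ i ∈ Finset.range (l1.toList.length - 1), pvDiagSum l1.toList l2.toList size (i + 1) 0 := by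
  show (((List.range l2.toList.length).map (fun j => ((0 : Nat), j)) ++
      (List.range (l1.toList.length - 1)).map (fun i => (i + 1, (0 : Nat)))).foldl
    (fun total (p : Nat × Nat) => pvBWalk l1.toList l2.toList size p.1 p.2 0 total) 0) = _
  rw [PySem.List.foldl_congr_mem
    ((List.range l2.toList.length).map (fun j => ((0 : Nat), j)) ++
      (List.range (l1.toList.length - 1)).map (fun i => (i + 1, (0 : Nat))))
    (fun total (p : Nat × Nat) => pvBWalk l1.toList l2.toList size p.1 p.2 0 total)
    (fun total (p : Nat × Nat) => total + pvDiagSum l1.toList l2.toList size p.1 p.2)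
    0
    (by
      intro acc p hp
      have hanch : p.1 = 0 ∨ p.2 = 0 := by
        rcases List.mem_append.mp hp with h | h <;>
          · simp only [List.mem_map, List.mem_range] at h
            obtain ⟨x, -, hx⟩ := h
            subst hx
            simp
      exact pvWalk_anchor l1.toList l2.toList size p.1 p.2 hanch acc)]
  rw [PySem.List.foldl_add
    ((List.range l2.toList.length).map (fun j => ((0 : Nat), j)) ++
      (List.range (l1.toList.length - 1)).map (fun i => (i + 1, (0 : Nat))))
    (fun p : Nat × Nat => pvDiagSum l1.toList l2.toList size p.1 p.2) 0]
  rw [List.map_append, List.sum_append, List.map_map, List.map_map, zero_add]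
  rfl

-- --- the grid sum is the sum over the diagonals anchored in the top row and left column ---

theorem pvDiagSum_eq_sum (c1 c2 : List Char) (size : Int) :
    ∀ i j, pvDiagSum c1 c2 size i j =
      ∑ t ∈ Finset.range (min (c1.length - i) (c2.length - j)),
        pvContrib c1 c2 size (i + t) (j + t) := by
  intro i j
  induction hn : c1.length - i using Nat.strong_induction_on generalizing i j with
  | _ n IH =>
    subst hn
    by_cases hb : i < c1.length ∧ j < c2.length
    · have hmin : min (c1.length - i) (c2.length - j) =
          min (c1.length - (i + 1)) (c2.length - (j + 1)) + 1 := by omega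
      rw [pvDiagSum, if_pos hb, IH (c1.length - (i + 1)) (by omega) (i + 1) (j + 1) rfl,
        hmin, Finset.sum_range_succ']
      simp only [Nat.add_zero]
      rw [add_comm]
      congr 1
      apply Finset.sum_congr rfl
      intro t _
      congr 1 <;> omega
    · have hmin : min (c1.length - i) (c2.length - j) = 0 := by omega
      rw [pvDiagSum, if_neg hb, hmin]
      simp

theorem pvGrid_eq_diags (g : Nat → Nat → Int) (m n : Nat) :
    (∑ i ∈ Finset.range m, ∑ j ∈ Finset.range n, g i j) =
      (∑ j ∈ Finset.range n, ∑ t ∈ Finset.range (min (m - 0) (n - j)), g (0 + t) (j + t)) +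
      ∑ i ∈ Finset.range (m - 1), ∑ t ∈ Finset.range (min (m - (i + 1)) (n - 0)),
          g (i + 1 + t) (0 + t) := by
  simp only [Nat.sub_zero, Nat.zero_add]
  rw [Finset.sum_sigma' (Finset.range n) (fun j => Finset.range (min m (n - j)))
      (fun j t => g t (j + t)),
    Finset.sum_sigma' (Finset.range (m - 1)) (fun i => Finset.range (min (m - (i + 1)) n))
      (fun i t => g (i + 1 + t) t),
    ← Finset.sum_product (Finset.range m) (Finset.range n) (fun p => g p.1 p.2),
    ← Finset.sum_filter_add_sum_filter_not (Finset.range m ×ˢ Finset.range n)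
      (fun p => p.1 ≤ p.2) (fun p => g p.1 p.2)]
  congr 1
  · refine Finset.sum_nbij' (fun p => ⟨p.2 - p.1, p.1⟩) (fun q => (q.2, q.1 + q.2)) ?_ ?_ ?_ ?_ ?_
    · intro p hp
      simp only [Finset.mem_filter, Finset.mem_product, Finset.mem_range] at hp
      simp only [Finset.mem_sigma, Finset.mem_range]
      omega
    · intro q hq
      simp only [Finset.mem_sigma, Finset.mem_range] at hq
      simp only [Finset.mem_filter, Finset.mem_product, Finset.mem_range]
      omega
    · intro p hp
      simp only [Finset.mem_filter, Finset.mem_product, Finset.mem_range] at hp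
      refine Prod.ext ?_ ?_ <;> (simp; try omega)
    · intro q _
      obtain ⟨a, b⟩ := q
      simp
    · intro p hp
      simp only [Finset.mem_filter, Finset.mem_product, Finset.mem_range] at hp
      have : p.2 - p.1 + p.1 = p.2 := by omega
      simp [this]
  · refine Finset.sum_nbij' (fun p => ⟨p.1 - p.2 - 1, p.2⟩) (fun q => (q.1 + 1 + q.2, q.2)) ?_ ?_ ?_ ?_ ?_
    · intro p hp
      simp only [Finset.mem_filter, Finset.mem_product, Finset.mem_range] at hp
      simp only [Finset.mem_sigma, Finset.mem_range]
      omega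
    · intro q hq
      simp only [Finset.mem_sigma, Finset.mem_range] at hq
      simp only [Finset.mem_filter, Finset.mem_product, Finset.mem_range]
      omega
    · intro p hp
      simp only [Finset.mem_filter, Finset.mem_product, Finset.mem_range] at hp
      refine Prod.ext ?_ ?_ <;> (simp; try omega)
    · intro q _
      obtain ⟨a, b⟩ := q
      have : a + 1 + b - b - 1 = a := by omega
      simp
    · intro p hp
      simp only [Finset.mem_filter, Finset.mem_product, Finset.mem_range] at hp
      have : p.1 - p.2 - 1 + 1 + p.2 = p.1 := by omega
      simp [this]

-- ===== VERDICT =====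
theorem common_sequences_score_spec : Claim_equal_common_sequences_score := by
  intro l1 l2 size _
  unfold Spec_common_sequences_score
  rw [pvA_grid, pvB_anchors]
  simp only [pvDiagSum_eq_sum]
  exact pvGrid_eq_diags (pvContrib l1.toList l2.toList size) l1.toList.length l2.toList.length
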